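-- pv_equiv track=rewrite | github.com/yosato/normalise_jp | normalise_mecab.py | upto_char
-- ===== SOURCE A (Python) =====
-- def upto_char(Str,Chars):
--     Substr=''
--     for Char in Str:
--         if Char in Chars:
--             break
--         else:
--             Substr+=Char
--     return Substr
-- ===== SOURCE B (Python) =====
-- def upto_char(Str, Chars):
--     i = next((j for j, c in enumerate(Str) if c in Chars), len(Str))
--     return Str[:i]
-- ===== Notes on version B (the rewrite author's own statement) =====
-- stated objective: idiomatic
-- what changed: B locates the boundary index of the first character in Chars (enumerate + next with len(Str) default) and returns one slice, instead of A's loop that grows a string by repeated concatenation and breaks.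
import Mathlib
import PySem

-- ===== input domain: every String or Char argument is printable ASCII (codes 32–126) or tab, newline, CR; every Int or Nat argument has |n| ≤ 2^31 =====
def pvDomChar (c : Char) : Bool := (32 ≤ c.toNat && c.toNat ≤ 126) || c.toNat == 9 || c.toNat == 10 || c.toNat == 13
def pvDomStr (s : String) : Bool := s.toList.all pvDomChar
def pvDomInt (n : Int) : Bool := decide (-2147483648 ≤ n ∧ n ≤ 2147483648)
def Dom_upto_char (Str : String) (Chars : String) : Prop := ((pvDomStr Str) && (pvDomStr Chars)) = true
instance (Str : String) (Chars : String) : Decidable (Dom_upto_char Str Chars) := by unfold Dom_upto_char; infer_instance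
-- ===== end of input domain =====

-- B locates the first index whose character is in Chars and returns one slice, instead of A's break-loop accumulating a string; equivalence proved on all inputs.
-- ===== PORT A =====
-- the for-loop with break: recursion over the remaining characters carrying Substr
def uptoGo (Chars : String) : List Char → String → String
  | [], acc => acc
  | c :: rest, acc =>
      if c ∈ Chars.toList then acc   -- 'if Char in Chars: break'
      else uptoGo Chars rest (acc.push c)   -- 'Substr += Char'

def upto_char (Str : String) (Chars : String) : String :=
  uptoGo Chars Str.toList ""

-- ===== PORT B =====
def upto_char_alt (Str : String) (Chars : String) : String :=
  -- i = next((j for j, c in enumerate(Str) if c in Chars), len(Str)): first index whose char is in Chars, else len(Str)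
  let i := Str.toList.findIdx (fun c => decide (c ∈ Chars.toList))
  -- Str[:i] with 0 ≤ i ≤ len(Str) is exactly 'take i'
  String.ofList (Str.toList.take i)

-- ===== PRECONDITION & SPEC =====
def Spec_upto_char (Str : String) (Chars : String) (out : String) : Prop := out = upto_char_alt Str Chars
instance (Str : String) (Chars : String) (out : String) : Decidable (Spec_upto_char Str Chars out) := by unfold Spec_upto_char; infer_instance

-- ===== CLAIM (what is proved, stated in full; the proofs are below) =====
def Claim_equal_upto_char : Prop := ∀ (Str : String) (Chars : String), Dom_upto_char Str Chars → Spec_upto_char Str Chars (upto_char Str Chars)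

-- ===== LEMMAS AND PROOFS =====

-- ===== VERDICT (by name: the statement is the Claim_ definition above) =====
theorem uptoGo_eq (Chars : String) (l : List Char) (acc : String) :
    uptoGo Chars l acc
      = acc ++ String.ofList (l.take (l.findIdx (fun c => decide (c ∈ Chars.toList)))) := by
  induction l generalizing acc with
  | nil =>
      apply String.toList_injective
      simp [uptoGo]
  | cons c rest ih =>
      by_cases h : c ∈ Chars.toList
      · apply String.toList_injective
        simp [uptoGo, h, List.findIdx_cons]
      · simp only [uptoGo, if_neg h, ih]
        simp only [List.findIdx_cons, h, decide_false, cond_false]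
        apply String.toList_injective
        simp [List.take_succ_cons]

theorem upto_char_spec : Claim_equal_upto_char := by
  intro S C _
  unfold Spec_upto_char upto_char upto_char_alt
  simp [uptoGo_eq]
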